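-- pv_equiv track=rewrite | github.com/matikurcze00/UMA_Rule_forrest | reguly.py | rozszerz_kompleks
-- ===== SOURCE A (Python) =====
-- import copy
--
-- def rozszerz_kompleks(kompleks, kompleks_ogolny, lista_atrybutow):
--     nowy_kompleks = []
--     kopia_lista_atrybutow = copy.copy(lista_atrybutow)
--     i = 0
--     flaga = 1
--     for kolumna in range(len(kompleks_ogolny)):
--         if flaga:
--             if kolumna == kopia_lista_atrybutow[0]:
--                 nowy_kompleks.append(kompleks[i])
--                 i += 1
--                 kopia_lista_atrybutow.remove(kolumna)
--                 if len(kopia_lista_atrybutow) < 1: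
--                     flaga = 0
--             else:
--                 nowy_kompleks.append(kompleks_ogolny[kolumna])
--         else:
--             nowy_kompleks.append(kompleks_ogolny[kolumna])
--     return nowy_kompleks
-- ===== SOURCE B (Python) =====
-- def rozszerz_kompleks(kompleks, kompleks_ogolny, lista_atrybutow):
--     pary = list(zip(lista_atrybutow, kompleks))
--     nowy = []
--     j = 0
--     for kol, wart in enumerate(kompleks_ogolny):
--         if j < len(pary) and pary[j][0] == kol:
--             nowy.append(pary[j][1])
--             j += 1
--         else:
--             nowy.append(wart)
--     return nowy
-- ===== Notes on version B (the rewrite author's own statement) =====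
-- stated objective: simpler
-- what changed: A builds the result column by column while mutating a copied attribute list with remove() and tracking a flaga/i state; B zips the attribute columns with their values once and merges that pair list into the base vector with a single cursor, no mutation and no flag. Pre_ excludes exactly the inputs on which A raises IndexError (empty attribute list with a nonempty base; more placed attribute columns than kompleks has values).
import Mathlib
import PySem

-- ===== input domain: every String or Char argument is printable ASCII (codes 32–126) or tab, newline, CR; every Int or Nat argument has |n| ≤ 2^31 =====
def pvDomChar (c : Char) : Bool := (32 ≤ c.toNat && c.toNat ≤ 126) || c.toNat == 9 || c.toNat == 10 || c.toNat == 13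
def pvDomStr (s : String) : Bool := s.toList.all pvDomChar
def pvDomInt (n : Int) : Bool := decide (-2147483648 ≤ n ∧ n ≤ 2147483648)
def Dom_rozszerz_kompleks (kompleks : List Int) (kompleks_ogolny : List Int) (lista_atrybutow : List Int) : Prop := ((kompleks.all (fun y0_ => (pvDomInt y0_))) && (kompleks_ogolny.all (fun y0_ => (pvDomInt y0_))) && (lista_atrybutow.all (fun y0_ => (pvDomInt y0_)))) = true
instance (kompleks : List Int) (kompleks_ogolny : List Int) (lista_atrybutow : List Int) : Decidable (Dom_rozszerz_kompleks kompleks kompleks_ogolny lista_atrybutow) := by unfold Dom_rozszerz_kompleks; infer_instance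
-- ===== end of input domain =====

-- B replaces A's build (mutating a copied attribute list with remove() plus a flaga/i state)
-- by a plain merge: zip the attribute columns with their values once, then walk the base vector
-- with a single cursor into that pair list. Objective: simpler (no list mutation, no flag state).

-- ===== PORT A =====
-- loop body of A's 'for kolumna in range(len(kompleks_ogolny))'; state = (nowy_kompleks, kopia_lista_atrybutow, i, flaga)
def pvStepA (kompleks kompleks_ogolny : List Int) (st : List Int × List Int × Int × Int) (kolumna : Int) : List Int × List Int × Int × Int :=
  match st with
  | (nowy, kopia, i, flaga) =>
    if flaga ≠ 0 then
      match PySem.List.pyGet? kopia 0 with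
      | some c =>
        if c = kolumna then
          let kopia' := (PySem.List.remove? kopia kolumna).getD kopia
          (nowy ++ [PySem.List.pyGetD kompleks i 0], kopia', i + 1,
           if (kopia'.length : Int) < 1 then 0 else 1)
        else
          (nowy ++ [PySem.List.pyGetD kompleks_ogolny kolumna 0], kopia, i, flaga)
      | none =>
        -- Python raises IndexError on kopia_lista_atrybutow[0] here; excluded by Pre_
        (nowy ++ [PySem.List.pyGetD kompleks_ogolny kolumna 0], kopia, i, flaga)
    else
      (nowy ++ [PySem.List.pyGetD kompleks_ogolny kolumna 0], kopia, i, flaga)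

def rozszerz_kompleks (kompleks : List Int) (kompleks_ogolny : List Int) (lista_atrybutow : List Int) : List Int :=
  ((PySem.List.pyRange 0 (kompleks_ogolny.length : Int) 1).foldl
    (pvStepA kompleks kompleks_ogolny) ([], lista_atrybutow, 0, 1)).1

-- ===== PORT B =====
-- loop body of B's 'for kol, wart in enumerate(kompleks_ogolny)'; state = (nowy, j)
def pvStepB (pary : List (Int × Int)) (st : List Int × Int) (kw : Int × Int) : List Int × Int :=
  match st with
  | (nowy, j) =>
    if j < (pary.length : Int) ∧ (PySem.List.pyGetD pary j (0, 0)).1 = kw.1 then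
      (nowy ++ [(PySem.List.pyGetD pary j (0, 0)).2], j + 1)
    else
      (nowy ++ [kw.2], j)

def rozszerz_kompleks_alt (kompleks : List Int) (kompleks_ogolny : List Int) (lista_atrybutow : List Int) : List Int :=
  let pary := lista_atrybutow.zip kompleks
  ((PySem.List.enumerate kompleks_ogolny 0).foldl (pvStepB pary) ([], 0)).1

-- ===== PRECONDITION & SPEC =====
-- length of the longest prefix of the list that is strictly increasing, starting above prev, all < n
-- (these are exactly the attribute columns that actually get a value from kompleks)
def pvIncPref (n : Int) (prev : Int) : List Int → Nat
  | [] => 0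
  | a :: rest => if prev < a ∧ a < n then pvIncPref n a rest + 1 else 0

-- Pre_ excludes exactly the inputs on which A raises IndexError: an empty lista_atrybutow with a
-- nonempty base (kopia_lista_atrybutow[0] at the first column), and inputs where more attribute
-- columns get placed (the strictly-increasing in-range prefix of lista_atrybutow) than kompleks
-- has values (kompleks[i] mid-scan). A returns on every input Pre_ admits.
def Pre_rozszerz_kompleks (kompleks : List Int) (kompleks_ogolny : List Int) (lista_atrybutow : List Int) : Prop :=
  (lista_atrybutow ≠ [] ∨ kompleks_ogolny = []) ∧
  pvIncPref (kompleks_ogolny.length : Int) (-1) lista_atrybutow ≤ kompleks.length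
instance (kompleks : List Int) (kompleks_ogolny : List Int) (lista_atrybutow : List Int) : Decidable (Pre_rozszerz_kompleks kompleks kompleks_ogolny lista_atrybutow) := by unfold Pre_rozszerz_kompleks; infer_instance

def pvWitness_rozszerz_kompleks : List Int × List Int × List Int := ([5, 6], [1, 2, 3], [0, 2])

def Spec_rozszerz_kompleks (kompleks : List Int) (kompleks_ogolny : List Int) (lista_atrybutow : List Int) (out : List Int) : Prop := out = rozszerz_kompleks_alt kompleks kompleks_ogolny lista_atrybutow
instance (kompleks : List Int) (kompleks_ogolny : List Int) (lista_atrybutow : List Int) (out : List Int) : Decidable (Spec_rozszerz_kompleks kompleks kompleks_ogolny lista_atrybutow out) := by unfold Spec_rozszerz_kompleks; infer_instance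

-- ===== CLAIM (what is proved, stated in full; the proofs are below) =====
def Claim_equal_rozszerz_kompleks : Prop := ∀ (kompleks : List Int) (kompleks_ogolny : List Int) (lista_atrybutow : List Int), Dom_rozszerz_kompleks kompleks kompleks_ogolny lista_atrybutow → Pre_rozszerz_kompleks kompleks kompleks_ogolny lista_atrybutow → Spec_rozszerz_kompleks kompleks kompleks_ogolny lista_atrybutow (rozszerz_kompleks kompleks kompleks_ogolny lista_atrybutow)
-- ===== LEMMAS AND PROOFS =====

-- Common description of both programs: the result for the m columns c, c+1, …, c+m-1,
-- given the not-yet-consumed attributes kopia and the next kompleks index i.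
def pvTp (k ko : List Int) : Nat → Nat → List Int → Int → List Int
  | 0, _, _, _ => []
  | m+1, c, kopia, i =>
    match kopia with
    | [] => PySem.List.pyGetD ko (c : Int) 0 :: pvTp k ko m (c+1) [] i
    | a :: rest =>
      if a = (c : Int) then PySem.List.pyGetD k i 0 :: pvTp k ko m (c+1) rest (i+1)
      else PySem.List.pyGetD ko (c : Int) 0 :: pvTp k ko m (c+1) (a :: rest) i

theorem pvTp_nil_map (k ko : List Int) : ∀ (m c : Nat) (i : Int),
    pvTp k ko m c [] i = (List.range' c m).map (fun t : Nat => PySem.List.pyGetD ko (t : Int) 0) := by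
  intro m
  induction m with
  | zero => intro c i; simp [pvTp]
  | succ m ih => intro c i; rw [pvTp, ih (c+1), List.range'_succ]; simp

theorem pvStepA_flag0 (k ko : List Int) : ∀ (cols : List Int) (acc kopia : List Int) (i : Int),
    ((cols.foldl (pvStepA k ko) (acc, kopia, i, 0))).1
      = acc ++ cols.map (fun kol => PySem.List.pyGetD ko kol 0) := by
  intro cols
  induction cols with
  | nil => intro acc kopia i; simp
  | cons kol cols ih =>
    intro acc kopia i
    simp only [List.foldl_cons, List.map_cons]
    rw [show pvStepA k ko (acc, kopia, i, 0) kol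
        = (acc ++ [PySem.List.pyGetD ko kol 0], kopia, i, 0) by simp [pvStepA]]
    rw [ih]
    simp

theorem pvStepA_nil (k ko : List Int) (acc : List Int) (i kol : Int) :
    pvStepA k ko (acc, [], i, 1) kol = (acc ++ [PySem.List.pyGetD ko kol 0], [], i, 1) := by
  simp [pvStepA, PySem.List.pyGet?, PySem.List.pyIdx?]

theorem pvStepA_hit (k ko : List Int) (acc rest : List Int) (i kol : Int) :
    pvStepA k ko (acc, kol :: rest, i, 1) kol
      = (acc ++ [PySem.List.pyGetD k i 0], rest, i + 1,
         if (rest.length : Int) < 1 then 0 else 1) := by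
  simp [pvStepA, PySem.List.pyGet?, PySem.List.pyIdx?]

theorem pvStepA_miss (k ko : List Int) (acc rest : List Int) (a i kol : Int) (ha : ¬ a = kol) :
    pvStepA k ko (acc, a :: rest, i, 1) kol
      = (acc ++ [PySem.List.pyGetD ko kol 0], a :: rest, i, 1) := by
  simp [pvStepA, PySem.List.pyGet?, PySem.List.pyIdx?, ha]

theorem pvA_run (k ko : List Int) : ∀ (m c : Nat) (acc kopia : List Int) (i : Int),
    ((((List.range' c m).map Int.ofNat).foldl (pvStepA k ko) (acc, kopia, i, 1))).1
      = acc ++ pvTp k ko m c kopia i := by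
  intro m
  induction m with
  | zero => intro c acc kopia i; simp [List.range'_zero, pvTp]
  | succ m ih =>
    intro c acc kopia i
    rw [List.range'_succ, List.map_cons, List.foldl_cons]
    match kopia with
    | [] =>
      rw [pvStepA_nil, ih (c+1)]
      simp [pvTp]
    | a :: rest =>
      by_cases ha : a = (Int.ofNat c)
      · rw [ha, pvStepA_hit]
        match rest with
        | [] =>
          rw [show (if ((([] : List Int).length : Int)) < 1 then (0:Int) else 1) = 0 by norm_num]
          rw [pvStepA_flag0, pvTp, if_pos (by exact_mod_cast rfl), pvTp_nil_map]
          simp [Function.comp]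
        | b :: rest' =>
          rw [show (if ((((b :: rest').length : Int))) < 1 then (0:Int) else 1) = 1 by
            simp]
          rw [ih (c+1)]
          simp [pvTp]
      · rw [pvStepA_miss k ko acc rest a i (Int.ofNat c) ha, ih (c+1)]
        have ha' : ¬ a = ((c : Nat) : Int) := ha
        simp [pvTp, ha']

theorem pvA_eq_tp (k ko la : List Int) :
    rozszerz_kompleks k ko la = pvTp k ko ko.length 0 la 0 := by
  have hr : PySem.List.pyRange 0 (ko.length : Int) 1
      = (List.range' 0 ko.length).map Int.ofNat := by
    rw [PySem.List.pyRange_one]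
    simp [List.range_eq_range']
  rw [rozszerz_kompleks, hr, pvA_run]
  simp

theorem pvIncPref_mono (n : Int) : ∀ (la : List Int) (p q : Int), p ≤ q →
    pvIncPref n q la ≤ pvIncPref n p la := by
  intro la
  induction la with
  | nil => intro p q h; simp [pvIncPref]
  | cons a rest ih =>
    intro p q h
    rw [pvIncPref, pvIncPref]
    split_ifs with h1 h2
    · exact Nat.le_refl _
    · omega
    · exact Nat.zero_le _
    · exact Nat.zero_le _

theorem pvB_go (k ko la : List Int) : ∀ (ws : List Int) (c j : Nat) (acc : List Int),
    ws = ko.drop c → j ≤ la.length →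
    j + pvIncPref (ko.length : Int) ((c : Int) - 1) (la.drop j) ≤ k.length →
    ((PySem.List.enumerate ws (c : Int)).foldl (pvStepB (la.zip k)) (acc, (j : Int))).1
      = acc ++ pvTp k ko ws.length c (la.drop j) (j : Int) := by
  intro ws
  induction ws with
  | nil => intro c j acc _ _ _; simp [PySem.List.enumerate, pvTp]
  | cons w ws ih =>
    intro c j acc hws hj hinv
    have hc : c < ko.length := by
      by_contra h
      have hd : ko.drop c = [] := List.drop_eq_nil_of_le (by omega)
      rw [hd] at hws
      exact List.cons_ne_nil _ _ hws
    have hko : ko.drop c = ko[c] :: ko.drop (c+1) := List.drop_eq_getElem_cons hc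
    rw [← hws] at hko
    have hw : w = ko[c] := by injection hko
    have hws' : ws = ko.drop (c+1) := by injection hko
    rw [PySem.List.enumerate_cons, List.foldl_cons]
    simp only [List.length_cons]
    rcases hla : la.drop j with _ | ⟨a, rest⟩
    · -- all attributes consumed: guard is false
      have hjl : j = la.length := by
        have := List.drop_eq_nil_iff.1 hla; omega
      have hguard : ¬ ((j : Int) < ((la.zip k).length : Int)
          ∧ (PySem.List.pyGetD (la.zip k) (j : Int) (0, 0)).1 = (c : Int)) := by
        rintro ⟨h1, -⟩
        rw [List.length_zip] at h1
        have : (la.zip k).length ≤ j := by rw [List.length_zip]; omega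
        omega
      rw [show pvStepB (la.zip k) (acc, (j : Int)) ((c : Int), w)
          = (acc ++ [w], (j : Int)) from by
        simp only [pvStepB]; rw [if_neg hguard]]
      have hinv' : j + pvIncPref (ko.length : Int) (((c+1 : Nat) : Int) - 1) (la.drop j) ≤ k.length := by
        rw [hla] at hinv ⊢; simpa [pvIncPref] using hinv
      rw [show ((c : Int) + 1) = ((c + 1 : Nat) : Int) by push_cast; ring]
      rw [ih (c+1) j (acc ++ [w]) hws' hj hinv', hla]
      rw [pvTp]
      simp [hw, PySem.List.pyGetD_natCast, List.getD, hc]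
    · have hjlt : j < la.length := by
        by_contra h
        rw [List.drop_eq_nil_of_le (by omega)] at hla
        exact List.cons_ne_nil _ _ hla.symm
      have hla' : la.drop j = la[j] :: la.drop (j+1) := List.drop_eq_getElem_cons hjlt
      have ha : a = la[j] := by rw [hla] at hla'; injection hla'
      have hrest : rest = la.drop (j+1) := by rw [hla] at hla'; injection hla'
      by_cases hac : a = (c : Int)
      · -- consume
        have hpref : pvIncPref (ko.length : Int) ((c : Int) - 1) (la.drop j)
            = pvIncPref (ko.length : Int) a rest + 1 := by
          rw [hla, pvIncPref, if_pos ⟨by omega, by omega⟩]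
        have hjk : j < k.length := by rw [hpref] at hinv; omega
        have hjz : j < (la.zip k).length := by rw [List.length_zip]; omega
        have hget : PySem.List.pyGetD (la.zip k) (j : Int) (0, 0) = (la[j], k[j]) := by
          rw [PySem.List.pyGetD_natCast, List.getD_eq_getElem _ _ hjz, List.getElem_zip]
        have hguard : ((j : Int) < ((la.zip k).length : Int)
            ∧ (PySem.List.pyGetD (la.zip k) (j : Int) (0, 0)).1 = (c : Int)) := by
          refine ⟨by exact_mod_cast hjz, ?_⟩
          rw [hget]; rw [← ha]; exact hac
        rw [show pvStepB (la.zip k) (acc, (j : Int)) ((c : Int), w)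
            = (acc ++ [k[j]], (j : Int) + 1) from by
          simp only [pvStepB]; rw [if_pos hguard, hget]]
        have hinv' : (j+1) + pvIncPref (ko.length : Int) (((c+1 : Nat) : Int) - 1) (la.drop (j+1)) ≤ k.length := by
          rw [hpref] at hinv
          have hmono : pvIncPref (ko.length : Int) (((c+1 : Nat) : Int) - 1) (la.drop (j+1))
              ≤ pvIncPref (ko.length : Int) a (la.drop (j+1)) := by
            apply pvIncPref_mono; push_cast; omega
          rw [← hrest] at hmono ⊢
          omega
        rw [show ((j : Int) + 1) = ((j + 1 : Nat) : Int) by push_cast; ring]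
        rw [show ((c : Int) + 1) = ((c + 1 : Nat) : Int) by push_cast; ring]
        rw [ih (c+1) (j+1) (acc ++ [k[j]]) hws' (by omega) hinv']
        have hkj : PySem.List.pyGetD k (j : Int) 0 = k[j] := by
          rw [PySem.List.pyGetD_natCast, List.getD_eq_getElem _ _ hjk]
        rw [pvTp, if_pos hac]
        simp [hkj, hrest]
      · -- miss
        have hguard : ¬ ((j : Int) < ((la.zip k).length : Int)
            ∧ (PySem.List.pyGetD (la.zip k) (j : Int) (0, 0)).1 = (c : Int)) := by
          rintro ⟨h1, h2⟩
          have hjz : j < (la.zip k).length := by exact_mod_cast h1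
          rw [PySem.List.pyGetD_natCast, List.getD_eq_getElem _ _ hjz, List.getElem_zip] at h2
          exact hac (ha ▸ h2)
        rw [show pvStepB (la.zip k) (acc, (j : Int)) ((c : Int), w)
            = (acc ++ [w], (j : Int)) from by
          simp only [pvStepB]; rw [if_neg hguard]]
        have hinv' : j + pvIncPref (ko.length : Int) (((c+1 : Nat) : Int) - 1) (la.drop j) ≤ k.length := by
          have hmono : pvIncPref (ko.length : Int) (((c+1 : Nat) : Int) - 1) (la.drop j)
              ≤ pvIncPref (ko.length : Int) ((c : Int) - 1) (la.drop j) := by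
            apply pvIncPref_mono; push_cast; omega
          omega
        rw [show ((c : Int) + 1) = ((c + 1 : Nat) : Int) by push_cast; ring]
        rw [ih (c+1) j (acc ++ [w]) hws' hj hinv', hla]
        rw [pvTp, if_neg hac]
        simp [hw, PySem.List.pyGetD_natCast, List.getD, hc]

theorem pvB_eq_tp (k ko la : List Int)
    (h : pvIncPref (ko.length : Int) (-1) la ≤ k.length) :
    rozszerz_kompleks_alt k ko la = pvTp k ko ko.length 0 la 0 := by
  have := pvB_go k ko la ko 0 0 [] (by simp) (Nat.zero_le _) (by simpa using h)
  simpa [rozszerz_kompleks_alt] using this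

-- ===== VERDICT (by name: the statement is the Claim_ definition above) =====
theorem rozszerz_kompleks_spec : Claim_equal_rozszerz_kompleks := by
  intro k ko la _ hpre
  unfold Spec_rozszerz_kompleks
  rw [pvA_eq_tp, pvB_eq_tp k ko la hpre.2]
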